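-- pv_equiv track=rewrite | github.com/febaa/AI-Recipe-Generator | app.py | categorize_ingredients
-- ===== SOURCE A (Python) =====
-- def categorize_ingredients(selected_ingredients):
--     vegetables = ['Potato', 'Onion', 'Tomato', 'Carrot', 'Bell Pepper', 'Broccoli', 'Spinach', 'Cauliflower', 'Garlic']
--     fruits = ['Apple', 'Banana', 'Orange', 'Strawberry', 'Blueberry', 'Grapes', 'Mango', 'Pineapple', 'Pear']
--     dairy_products = ['Milk', 'Cheese', 'Yogurt', 'Butter', 'Cream', 'Paneer']
--     proteins = ['Chicken', 'Beef', 'Pork', 'Tofu', 'Lentils', 'Eggs', 'Fish', 'Shrimp', 'Chickpeas']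
--
--     categorized_ingredients = {
--         'Vegetables': [],
--         'Fruits': [],
--         'Dairy': [],
--         'Proteins': [],
--         'Others': []
--     }
--
--     for ingredient in selected_ingredients:
--         if ingredient in vegetables:
--             categorized_ingredients['Vegetables'].append(ingredient)
--         elif ingredient in fruits:
--             categorized_ingredients['Fruits'].append(ingredient)
--         elif ingredient in dairy_products:
--             categorized_ingredients['Dairy'].append(ingredient)
--         elif ingredient in proteins:
--             categorized_ingredients['Proteins'].append(ingredient)
--         else:
--             categorized_ingredients['Others'].append(ingredient)
--
--     return categorized_ingredients
-- ===== SOURCE B (Python) =====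
-- def categorize_ingredients(selected_ingredients):
--     vegetables = ['Potato', 'Onion', 'Tomato', 'Carrot', 'Bell Pepper', 'Broccoli', 'Spinach', 'Cauliflower', 'Garlic']
--     fruits = ['Apple', 'Banana', 'Orange', 'Strawberry', 'Blueberry', 'Grapes', 'Mango', 'Pineapple', 'Pear']
--     dairy_products = ['Milk', 'Cheese', 'Yogurt', 'Butter', 'Cream', 'Paneer']
--     proteins = ['Chicken', 'Beef', 'Pork', 'Tofu', 'Lentils', 'Eggs', 'Fish', 'Shrimp', 'Chickpeas']
--     known = set(vegetables) | set(fruits) | set(dairy_products) | set(proteins)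
--
--     # Declarative, staged construction: one filtering pass per bucket instead of a
--     # mutating per-item branch loop; correct because the four category lists are disjoint.
--     return {
--         'Vegetables': [i for i in selected_ingredients if i in vegetables],
--         'Fruits': [i for i in selected_ingredients if i in fruits],
--         'Dairy': [i for i in selected_ingredients if i in dairy_products],
--         'Proteins': [i for i in selected_ingredients if i in proteins],
--         'Others': [i for i in selected_ingredients if i not in known],
--     }
-- ===== Notes on version B (the rewrite author's own statement) =====
-- stated objective: idiomatic
-- what changed: Replaces A's single mutating loop with a four-way if/elif branch chain by a staged, declarative construction: the result dict is built directly from five independent filtering passes (one list comprehension per bucket, plus a known-ingredient set for 'Others'), correct because the category lists are disjoint.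
import Mathlib
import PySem

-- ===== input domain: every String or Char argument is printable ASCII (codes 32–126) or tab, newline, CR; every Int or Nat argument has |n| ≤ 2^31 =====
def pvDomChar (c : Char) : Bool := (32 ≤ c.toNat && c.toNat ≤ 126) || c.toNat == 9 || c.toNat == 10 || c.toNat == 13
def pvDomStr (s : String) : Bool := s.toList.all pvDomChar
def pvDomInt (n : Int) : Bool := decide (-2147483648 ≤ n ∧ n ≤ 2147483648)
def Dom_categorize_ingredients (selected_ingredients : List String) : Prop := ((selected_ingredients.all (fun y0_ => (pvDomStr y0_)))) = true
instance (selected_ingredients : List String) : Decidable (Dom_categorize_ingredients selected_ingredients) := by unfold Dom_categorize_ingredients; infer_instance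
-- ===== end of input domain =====

-- B replaces A's single mutating loop with its if/elif branch chain by a staged, declarative
-- construction: five independent filtering passes, one per bucket (idiomatic).

def pvVeg : List String := ["Potato", "Onion", "Tomato", "Carrot", "Bell Pepper", "Broccoli", "Spinach", "Cauliflower", "Garlic"]
def pvFruits : List String := ["Apple", "Banana", "Orange", "Strawberry", "Blueberry", "Grapes", "Mango", "Pineapple", "Pear"]
def pvDairy : List String := ["Milk", "Cheese", "Yogurt", "Butter", "Cream", "Paneer"]
def pvProteins : List String := ["Chicken", "Beef", "Pork", "Tofu", "Lentils", "Eggs", "Fish", "Shrimp", "Chickpeas"]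

-- ===== PORT A =====
def pvInit : PySem.Dict String (List String) :=
  PySem.Dict.ofList [("Vegetables", []), ("Fruits", []), ("Dairy", []), ("Proteins", []), ("Others", [])]

def categorize_ingredients (selected_ingredients : List String) : List (String × List String) :=
  (selected_ingredients.foldl (fun d ingredient =>
      if pvVeg.contains ingredient then d.modify "Vegetables" [] (· ++ [ingredient])
      else if pvFruits.contains ingredient then d.modify "Fruits" [] (· ++ [ingredient])
      else if pvDairy.contains ingredient then d.modify "Dairy" [] (· ++ [ingredient])
      else if pvProteins.contains ingredient then d.modify "Proteins" [] (· ++ [ingredient])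
      else d.modify "Others" [] (· ++ [ingredient]))
    pvInit).items

-- ===== PORT B =====
-- known = set(vegetables) | set(fruits) | set(dairy_products) | set(proteins)
def pvKnown : PySem.Set String :=
  PySem.Set.union (PySem.Set.union (PySem.Set.union (PySem.Set.ofList pvVeg) (PySem.Set.ofList pvFruits)) (PySem.Set.ofList pvDairy)) (PySem.Set.ofList pvProteins)

def categorize_ingredients_alt (selected_ingredients : List String) : List (String × List String) :=
  [("Vegetables", selected_ingredients.filter (fun i => pvVeg.contains i)),
   ("Fruits", selected_ingredients.filter (fun i => pvFruits.contains i)),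
   ("Dairy", selected_ingredients.filter (fun i => pvDairy.contains i)),
   ("Proteins", selected_ingredients.filter (fun i => pvProteins.contains i)),
   ("Others", selected_ingredients.filter (fun i => !(pvKnown.contains i)))]

-- ===== PRECONDITION & SPEC =====
def Spec_categorize_ingredients (selected_ingredients : List String) (out : List (String × List String)) : Prop := out = categorize_ingredients_alt selected_ingredients
instance (selected_ingredients : List String) (out : List (String × List String)) : Decidable (Spec_categorize_ingredients selected_ingredients out) := by unfold Spec_categorize_ingredients; infer_instance

-- ===== CLAIM =====
def Claim_equal_categorize_ingredients : Prop := ∀ (selected_ingredients : List String), Dom_categorize_ingredients selected_ingredients → Spec_categorize_ingredients selected_ingredients (categorize_ingredients selected_ingredients)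

-- ===== LEMMAS AND PROOFS =====

set_option maxRecDepth 100000

-- the known set is the concatenation of the four (pairwise disjoint, duplicate-free) lists
lemma pvKnown_eq : pvKnown = pvVeg ++ pvFruits ++ pvDairy ++ pvProteins := by decide

lemma veg_excl (x : String) (h : pvVeg.contains x = true) :
    pvFruits.contains x = false ∧ pvDairy.contains x = false ∧ pvProteins.contains x = false := by
  simp only [pvVeg, List.contains_eq_mem, decide_eq_true_eq, List.mem_cons, List.not_mem_nil, or_false] at h
  rcases h with rfl|rfl|rfl|rfl|rfl|rfl|rfl|rfl|rfl <;> refine ⟨by decide, by decide, by decide⟩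

lemma fruits_excl (x : String) (h : pvFruits.contains x = true) :
    pvDairy.contains x = false ∧ pvProteins.contains x = false := by
  simp only [pvFruits, List.contains_eq_mem, decide_eq_true_eq, List.mem_cons, List.not_mem_nil, or_false] at h
  rcases h with rfl|rfl|rfl|rfl|rfl|rfl|rfl|rfl|rfl <;> refine ⟨by decide, by decide⟩

lemma dairy_excl (x : String) (h : pvDairy.contains x = true) :
    pvProteins.contains x = false := by
  simp only [pvDairy, List.contains_eq_mem, decide_eq_true_eq, List.mem_cons, List.not_mem_nil, or_false] at h
  rcases h with rfl|rfl|rfl|rfl|rfl|rfl <;> decide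

lemma known_contains (x : String) :
    pvKnown.contains x = (pvVeg.contains x || pvFruits.contains x || pvDairy.contains x || pvProteins.contains x) := by
  rw [pvKnown_eq]
  simp [List.contains_eq_mem, List.mem_append, Bool.or_assoc]

-- loop invariant: A's fold over any 5-bucket state appends the corresponding filters
lemma loopA (sel : List String) : ∀ (v f d p o : List String),
    (sel.foldl (fun d ingredient =>
      if pvVeg.contains ingredient then d.modify "Vegetables" [] (· ++ [ingredient])
      else if pvFruits.contains ingredient then d.modify "Fruits" [] (· ++ [ingredient])
      else if pvDairy.contains ingredient then d.modify "Dairy" [] (· ++ [ingredient])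
      else if pvProteins.contains ingredient then d.modify "Proteins" [] (· ++ [ingredient])
      else d.modify "Others" [] (· ++ [ingredient]))
      (PySem.Dict.mk [("Vegetables", v), ("Fruits", f), ("Dairy", d), ("Proteins", p), ("Others", o)])) =
    PySem.Dict.mk [("Vegetables", v ++ sel.filter (fun i => pvVeg.contains i)),
                   ("Fruits", f ++ sel.filter (fun i => pvFruits.contains i)),
                   ("Dairy", d ++ sel.filter (fun i => pvDairy.contains i)),
                   ("Proteins", p ++ sel.filter (fun i => pvProteins.contains i)),
                   ("Others", o ++ sel.filter (fun i => !(pvKnown.contains i)))] := by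
  induction sel with
  | nil => intro v f d p o; simp
  | cons x r ih =>
    intro v f d p o
    simp only [List.foldl_cons]
    by_cases h1 : pvVeg.contains x = true
    · obtain ⟨e2, e3, e4⟩ := veg_excl x h1
      have hk : pvKnown.contains x = true := by rw [known_contains, h1]; simp
      rw [if_pos h1,
        show (PySem.Dict.mk [("Vegetables", v), ("Fruits", f), ("Dairy", d), ("Proteins", p), ("Others", o)]).modify "Vegetables" [] (· ++ [x]) = PySem.Dict.mk [("Vegetables", v ++ [x]), ("Fruits", f), ("Dairy", d), ("Proteins", p), ("Others", o)] from by
          simp [PySem.Dict.modify, PySem.Dict.insert, PySem.Dict.getD, PySem.Dict.get?],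
        ih]
      simp only [List.contains_eq_mem, decide_eq_true_eq, decide_eq_false_iff_not] at h1 e2 e3 e4
      have hk' : x ∈ pvKnown := by simpa [PySem.Set.contains, List.contains_eq_mem] using hk
      simp [h1, e2, e3, e4, hk']
    · rw [Bool.not_eq_true] at h1
      by_cases h2 : pvFruits.contains x = true
      · obtain ⟨e3, e4⟩ := fruits_excl x h2
        have hk : pvKnown.contains x = true := by rw [known_contains, h2]; simp
        rw [h1, if_neg Bool.false_ne_true, if_pos h2,
          show (PySem.Dict.mk [("Vegetables", v), ("Fruits", f), ("Dairy", d), ("Proteins", p), ("Others", o)]).modify "Fruits" [] (· ++ [x]) = PySem.Dict.mk [("Vegetables", v), ("Fruits", f ++ [x]), ("Dairy", d), ("Proteins", p), ("Others", o)] from by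
            simp [PySem.Dict.modify, PySem.Dict.insert, PySem.Dict.getD, PySem.Dict.get?],
          ih]
        simp only [List.contains_eq_mem, decide_eq_true_eq, decide_eq_false_iff_not] at h1 h2 e3 e4
        have hk' : x ∈ pvKnown := by simpa [PySem.Set.contains, List.contains_eq_mem] using hk
        simp [h1, h2, e3, e4, hk']
      · rw [Bool.not_eq_true] at h2
        by_cases h3 : pvDairy.contains x = true
        · have e4 := dairy_excl x h3
          have hk : pvKnown.contains x = true := by rw [known_contains, h3]; simp
          rw [h1, if_neg Bool.false_ne_true, h2, if_neg Bool.false_ne_true, if_pos h3,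
            show (PySem.Dict.mk [("Vegetables", v), ("Fruits", f), ("Dairy", d), ("Proteins", p), ("Others", o)]).modify "Dairy" [] (· ++ [x]) = PySem.Dict.mk [("Vegetables", v), ("Fruits", f), ("Dairy", d ++ [x]), ("Proteins", p), ("Others", o)] from by
              simp [PySem.Dict.modify, PySem.Dict.insert, PySem.Dict.getD, PySem.Dict.get?],
            ih]
          simp only [List.contains_eq_mem, decide_eq_true_eq, decide_eq_false_iff_not] at h1 h2 h3 e4
          have hk' : x ∈ pvKnown := by simpa [PySem.Set.contains, List.contains_eq_mem] using hk
          simp [h1, h2, h3, e4, hk']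
        · rw [Bool.not_eq_true] at h3
          by_cases h4 : pvProteins.contains x = true
          · have hk : pvKnown.contains x = true := by rw [known_contains, h4]; simp
            rw [h1, if_neg Bool.false_ne_true, h2, if_neg Bool.false_ne_true, h3, if_neg Bool.false_ne_true, if_pos h4,
              show (PySem.Dict.mk [("Vegetables", v), ("Fruits", f), ("Dairy", d), ("Proteins", p), ("Others", o)]).modify "Proteins" [] (· ++ [x]) = PySem.Dict.mk [("Vegetables", v), ("Fruits", f), ("Dairy", d), ("Proteins", p ++ [x]), ("Others", o)] from by
                simp [PySem.Dict.modify, PySem.Dict.insert, PySem.Dict.getD, PySem.Dict.get?],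
              ih]
            simp only [List.contains_eq_mem, decide_eq_true_eq, decide_eq_false_iff_not] at h1 h2 h3 h4
            have hk' : x ∈ pvKnown := by simpa [PySem.Set.contains, List.contains_eq_mem] using hk
            simp [h1, h2, h3, h4, hk']
          · rw [Bool.not_eq_true] at h4
            have hk : pvKnown.contains x = false := by
              rw [known_contains, h1, h2, h3, h4]; rfl
            rw [h1, if_neg Bool.false_ne_true, h2, if_neg Bool.false_ne_true, h3, if_neg Bool.false_ne_true, h4, if_neg Bool.false_ne_true,
              show (PySem.Dict.mk [("Vegetables", v), ("Fruits", f), ("Dairy", d), ("Proteins", p), ("Others", o)]).modify "Others" [] (· ++ [x]) = PySem.Dict.mk [("Vegetables", v), ("Fruits", f), ("Dairy", d), ("Proteins", p), ("Others", o ++ [x])] from by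
                simp [PySem.Dict.modify, PySem.Dict.insert, PySem.Dict.getD, PySem.Dict.get?],
              ih]
            simp only [List.contains_eq_mem, decide_eq_false_iff_not] at h1 h2 h3 h4
            have hk' : x ∉ pvKnown := by simpa [PySem.Set.contains, List.contains_eq_mem] using hk
            simp [h1, h2, h3, h4, hk']

theorem categorize_ingredients_spec : Claim_equal_categorize_ingredients := by
  intro sel _
  show categorize_ingredients sel = categorize_ingredients_alt sel
  unfold categorize_ingredients categorize_ingredients_alt pvInit
  rw [show PySem.Dict.ofList [("Vegetables", ([] : List String)), ("Fruits", []), ("Dairy", []), ("Proteins", []), ("Others", [])] = PySem.Dict.mk [("Vegetables", []), ("Fruits", []), ("Dairy", []), ("Proteins", []), ("Others", [])] from by decide]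
  rw [loopA]
  rfl
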